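-- pv_equiv track=rewrite | github.com/ziho9593/DLwithPython | APS/PROGRAMMERS/LEVEL_1/숫자_문자열과_영단어.py | solution
-- ===== SOURCE A (Python) =====
-- def solution(s):
--     d = {"zero": 0,
--         "one": 1,
--         "two": 2,
--         "three": 3,
--         "four": 4,
--         "five": 5,
--         "six": 6,
--         "seven": 7,
--         "eight": 8,
--         "nine": 9,
--         }
--     result = ''
--     now = ''
--     for c in s:
--         if c.isdigit():
--             result += c
--         else:
--             now += c
--         if now in d:
--             result += str(d[now])
--             now = ''
--     return int(result)
-- ===== SOURCE B (Python) =====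
-- def solution(s):
--     words = {"zero": "0",
--              "one": "1",
--              "two": "2",
--              "three": "3",
--              "four": "4",
--              "five": "5",
--              "six": "6",
--              "seven": "7",
--              "eight": "8",
--              "nine": "9",
--              }
--     start = list(words.items())
--     viable = start
--     out = ""
--     for c in s:
--         if c.isdigit():
--             out += c
--         else:
--             viable = [(rest[1:], d) for rest, d in viable if rest[:1] == c]
--             hits = [d for rest, d in viable if not rest]
--             if hits:
--                 out += hits[0]
--                 viable = start
--     return int(out)
-- ===== Notes on version B (the rewrite author's own statement) =====
-- stated objective: alternative
-- what changed: A accumulates pending letters in a growing string buffer and tests the whole buffer against the word dict after every character; B instead advances a list of still-viable (word-suffix, digit) candidates one character at a time (a trie-automaton step), emits a digit when a candidate is exhausted, and never re-reads or re-hashes the buffer.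
import Mathlib
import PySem

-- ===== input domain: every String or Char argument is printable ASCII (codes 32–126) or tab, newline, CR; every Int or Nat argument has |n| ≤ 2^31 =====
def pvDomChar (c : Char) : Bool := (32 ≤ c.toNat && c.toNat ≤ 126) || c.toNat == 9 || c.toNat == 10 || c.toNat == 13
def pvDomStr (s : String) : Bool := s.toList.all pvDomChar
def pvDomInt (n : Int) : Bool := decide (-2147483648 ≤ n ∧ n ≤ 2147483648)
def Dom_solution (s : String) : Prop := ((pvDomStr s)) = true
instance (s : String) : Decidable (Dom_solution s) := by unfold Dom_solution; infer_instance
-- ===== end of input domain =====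

-- B replaces A's growing letter buffer + dict-membership test per character by a list of still-
-- viable (word-suffix, digit) candidates updated per character (a trie-automaton step).
-- No argument is mutated.

-- ===== PORT A =====
-- the dict d of A, keyed by the number words
def pvDictA : PySem.Dict String Int :=
  PySem.Dict.ofList [("zero", 0), ("one", 1), ("two", 2), ("three", 3), ("four", 4),
                     ("five", 5), ("six", 6), ("seven", 7), ("eight", 8), ("nine", 9)]

-- one iteration of A's `for c in s` body (c.isdigit() on a 1-char ASCII string = Chars.isdigit c;
-- d[now] is guarded by `now in d`, so getD's default is never the looked-up value)
def pvStepA (st : String × String) (c : Char) : String × String :=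
  let result := st.1
  let now := st.2
  let result := if PySem.Chars.isdigit c then result.push c else result
  let now := if PySem.Chars.isdigit c then now else now.push c
  if pvDictA.contains now then (result ++ PySem.Int.toStr (pvDictA.getD now 0), "") else (result, now)

-- int(result) raises ValueError when result is not an int literal (ofStr? = none); Pre_ excludes
-- exactly those inputs, so the .getD 0 branch is never the returned value on admitted inputs.
def solution (s : String) : Int :=
  let fin := s.toList.foldl pvStepA ("", "")
  (PySem.Int.ofStr? fin.1).getD 0

-- ===== PORT B =====
-- the dict of B as its items() list: start = list(words.items())
def pvWordsB : List (String × String) :=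
  [("zero", "0"), ("one", "1"), ("two", "2"), ("three", "3"), ("four", "4"),
   ("five", "5"), ("six", "6"), ("seven", "7"), ("eight", "8"), ("nine", "9")]

-- the comprehension `[(rest[1:], d) for rest, d in viable if rest[:1] == c]`, element-wise
def pvFilt (c : Char) (rd : String × String) : Option (String × String) :=
  if PySem.Str.slice rd.1 none (some 1) == String.singleton c
  then some (PySem.Str.slice rd.1 (some 1) none, rd.2) else none

-- one iteration of B's loop body
def pvStepB (st : String × List (String × String)) (c : Char) : String × List (String × String) :=
  if PySem.Chars.isdigit c then (st.1.push c, st.2)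
  else
    let viable := st.2.filterMap (pvFilt c)
    let hits := viable.filterMap (fun rd => if rd.1 == "" then some rd.2 else none)
    match hits with
    | [] => (st.1, viable)
    | d :: _ => (st.1 ++ d, pvWordsB)

-- int(out) raises ValueError exactly when out is empty (out only collects digit characters);
-- Pre_ excludes those inputs, as for A.
def solution_alt (s : String) : Int :=
  let fin := s.toList.foldl pvStepB ("", pvWordsB)
  (PySem.Int.ofStr? fin.1).getD 0

-- ===== PRECONDITION & SPEC =====
def pvWordsPre : List String :=
  ["zero", "one", "two", "three", "four", "five", "six", "seven", "eight", "nine"]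

-- Pre_ excludes the strings whose collected digit string is empty — no digit character and no
-- leading number word — on which A's final int() call raises ValueError; B raises there too.
def Pre_solution (s : String) : Prop :=
  s.toList.any PySem.Chars.isdigit = true
    ∨ pvWordsPre.any (fun w => PySem.Str.startswith s w) = true
instance (s : String) : Decidable (Pre_solution s) := by unfold Pre_solution; infer_instance

def pvWitness_solution : String := "one4two"

def Spec_solution (s : String) (out : Int) : Prop := out = solution_alt s
instance (s : String) (out : Int) : Decidable (Spec_solution s out) := by unfold Spec_solution; infer_instance

-- ===== CLAIM (what is proved, stated in full; the proofs are below) =====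
def Claim_equal_solution : Prop := ∀ (s : String), Dom_solution s → Pre_solution s → Spec_solution s (solution s)

-- ===== LEMMAS AND PROOFS =====

-- the viable candidates determined by A's pending buffer n: for every number word that n is a
-- prefix of, the not-yet-seen suffix together with the word's digit
def pvVOf (n : List Char) : List (String × String) :=
  pvWordsB.filterMap (fun p =>
    if n.isPrefixOf p.1.toList then some (String.ofList (p.1.toList.drop n.length), p.2) else none)

theorem pv_vof_nil : pvVOf [] = pvWordsB := by
  simp [pvVOf, pvWordsB]

theorem pv_contains_eq (k : String) :
    pvDictA.contains k = pvWordsB.any (fun p => p.1 == k) := by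
  have hd : pvDictA = PySem.Dict.mk [("zero", 0), ("one", 1), ("two", 2), ("three", 3),
      ("four", 4), ("five", 5), ("six", 6), ("seven", 7), ("eight", 8), ("nine", 9)] := by
    decide
  rw [hd, PySem.Dict.contains_mk]
  rfl

theorem pv_slice_take (r : List Char) :
    PySem.Chars.slice r none (some 1) = r.take 1 := by
  simp [PySem.Chars.slice_eq_listSlice, PySem.List.slice]

theorem pv_slice_drop (r : List Char) :
    PySem.Chars.slice r (some 1) none = r.drop 1 := by
  cases r with
  | nil => rfl
  | cons c t => simp [PySem.Chars.slice_eq_listSlice, PySem.List.slice]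

theorem pv_prefix_snoc (n w : List Char) (c : Char) :
    (n ++ [c]) <+: w ↔ (n <+: w ∧ (w.drop n.length).take 1 = [c]) := by
  constructor
  · intro h
    obtain ⟨t, ht⟩ := h
    rw [List.append_assoc] at ht
    refine ⟨⟨[c] ++ t, ht⟩, ?_⟩
    rw [← ht, List.drop_left]
    rfl
  · rintro ⟨⟨t, rfl⟩, h2⟩
    rw [List.drop_left] at h2
    cases t with
    | nil => exact absurd h2 (by simp)
    | cons a t' =>
      obtain rfl : a = c := by
        rw [show (a :: t').take 1 = [a] from rfl] at h2
        simpa using h2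
      exact ⟨t', by simp⟩

-- stepping the viable set by one letter is exactly extending the buffer by that letter
set_option maxHeartbeats 2000000 in
theorem pv_vof_step (n : List Char) (c : Char) :
    (pvVOf n).filterMap (pvFilt c) = pvVOf (n ++ [c]) := by
  unfold pvVOf
  rw [List.filterMap_filterMap]
  apply List.filterMap_congr
  intro p _
  by_cases h1 : n <+: p.1.toList
  · rw [if_pos (List.isPrefixOf_iff_prefix.mpr h1), Option.bind_some]
    by_cases h2 : (p.1.toList.drop n.length).take 1 = [c]
    · have hcond : (PySem.Str.slice (String.ofList (p.1.toList.drop n.length)) none (some 1)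
          == String.singleton c) = true := by
        rw [beq_iff_eq]
        apply String.toList_inj.mp
        rw [PySem.Str.toList_slice, String.toList_ofList, pv_slice_take, h2]
        simp
      rw [pvFilt, if_pos hcond,
        if_pos (List.isPrefixOf_iff_prefix.mpr ((pv_prefix_snoc n p.1.toList c).mpr ⟨h1, h2⟩))]
      have hs : PySem.Str.slice (String.ofList (p.1.toList.drop n.length)) (some 1) none
          = String.ofList (p.1.toList.drop (n ++ [c]).length) := by
        apply String.toList_inj.mp
        rw [PySem.Str.toList_slice, String.toList_ofList, pv_slice_drop, String.toList_ofList]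
        rw [List.drop_drop]
        congr 1
        simp
      rw [hs]
    · have hcond : (PySem.Str.slice (String.ofList (p.1.toList.drop n.length)) none (some 1)
          == String.singleton c) = false := by
        rw [beq_eq_false_iff_ne]
        intro he
        apply h2
        have := congrArg String.toList he
        rw [PySem.Str.toList_slice, String.toList_ofList, pv_slice_take] at this
        simpa using this
      rw [pvFilt, if_neg (by simp [hcond])]
      rw [if_neg (fun hh => h2 ((pv_prefix_snoc n p.1.toList c).mp
        (List.isPrefixOf_iff_prefix.mp hh)).2)]
  · rw [if_neg (fun hh => h1 (List.isPrefixOf_iff_prefix.mp hh))]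
    rw [if_neg (fun hh => h1 ((List.prefix_append n [c]).trans
      (List.isPrefixOf_iff_prefix.mp hh)))]
    rfl

theorem pv_hits_nil (m : List Char)
    (hc : pvDictA.contains (String.ofList m) = false) :
    (pvVOf m).filterMap (fun rd => if rd.1 == "" then some rd.2 else none) = [] := by
  rw [List.filterMap_eq_nil_iff]
  intro rd hrd
  obtain ⟨p, hp, hif⟩ := List.mem_filterMap.mp hrd
  by_cases h1 : m.isPrefixOf p.1.toList = true
  · rw [if_pos h1, Option.some_inj] at hif
    subst hif
    rw [if_neg]
    intro hemp
    rw [beq_iff_eq] at hemp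
    have hnil : p.1.toList.drop m.length = [] := by
      have := congrArg String.toList hemp
      rw [String.toList_ofList] at this
      simpa using this
    have hlen : p.1.toList.length ≤ m.length := by
      have := congrArg List.length hnil
      rw [List.length_drop, List.length_nil] at this
      omega
    have heq : p.1.toList = m :=
      ((List.isPrefixOf_iff_prefix.mp h1).eq_of_length_le hlen).symm
    have hmem : pvWordsB.any (fun q => q.1 == String.ofList m) = true := by
      apply List.any_eq_true.mpr
      exact ⟨p, hp, by rw [beq_iff_eq]; apply String.toList_inj.mp; rw [String.toList_ofList, heq]⟩
    rw [pv_contains_eq, hmem] at hc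
    exact Bool.true_eq_false ▸ hc
  · rw [if_neg h1] at hif
    exact absurd hif (by simp)

theorem pv_push_ofList (n : List Char) (c : Char) :
    (String.ofList n).push c = String.ofList (n ++ [c]) := by
  apply String.toList_inj.mp
  simp

theorem pv_getD_digit : ∀ p ∈ pvWordsB, PySem.Int.toStr (pvDictA.getD p.1 0) = p.2 := by
  decide

theorem pv_hits_word : ∀ p ∈ pvWordsB, (pvVOf p.1.toList).filterMap
    (fun rd => if rd.1 == "" then some rd.2 else none) = [p.2] := by
  decide

-- the two loops produce the same collected digit string, from any reachable pair of states
theorem pv_main (l : List Char) : ∀ (out : String) (n : List Char),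
    pvDictA.contains (String.ofList n) = false →
    (l.foldl pvStepA (out, String.ofList n)).1 = (l.foldl pvStepB (out, pvVOf n)).1 := by
  induction l with
  | nil => intro out n _; rfl
  | cons c l ih =>
    intro out n hn
    cases hdig : PySem.Chars.isdigit c with
    | true =>
      have ha : pvStepA (out, String.ofList n) c = (out.push c, String.ofList n) := by
        simp only [pvStepA, hdig, if_true, hn, Bool.false_eq_true, if_false]
      have hb : pvStepB (out, pvVOf n) c = (out.push c, pvVOf n) := by
        simp only [pvStepB, hdig, if_true]
      rw [List.foldl_cons, List.foldl_cons, ha, hb]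
      exact ih (out.push c) n hn
    | false =>
      cases hc : pvDictA.contains (String.ofList (n ++ [c])) with
      | false =>
        have ha : pvStepA (out, String.ofList n) c = (out, String.ofList (n ++ [c])) := by
          simp only [pvStepA, hdig, Bool.false_eq_true, if_false, pv_push_ofList, hc]
        have hb : pvStepB (out, pvVOf n) c = (out, pvVOf (n ++ [c])) := by
          simp only [pvStepB, hdig, Bool.false_eq_true, if_false, pv_vof_step,
            pv_hits_nil (n ++ [c]) hc]
        rw [List.foldl_cons, List.foldl_cons, ha, hb]
        exact ih out (n ++ [c]) hc
      | true =>
        -- the buffer has just completed a number word: both sides emit its digit and reset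
        have hmem := List.any_eq_true.mp (by rw [← pv_contains_eq]; exact hc)
        obtain ⟨p, hp, hbeq⟩ := hmem
        have hm : String.ofList (n ++ [c]) = p.1 := (beq_iff_eq.mp hbeq).symm
        have hml : n ++ [c] = p.1.toList := by
          have := congrArg String.toList hm
          rwa [String.toList_ofList] at this
        have hcp : pvDictA.contains p.1 = true := by rw [← hm]; exact hc
        have ha : pvStepA (out, String.ofList n) c
            = (out ++ PySem.Int.toStr (pvDictA.getD (p.1) 0), "") := by
          simp only [pvStepA, hdig, Bool.false_eq_true, if_false, pv_push_ofList, hm, hcp, if_true]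
        have hv : (pvVOf n).filterMap (pvFilt c) = pvVOf p.1.toList := by
          rw [pv_vof_step, hml]
        have hE1 : PySem.Int.toStr (pvDictA.getD p.1 0) = p.2 := pv_getD_digit p hp
        have hhits : (pvVOf p.1.toList).filterMap
            (fun rd => if rd.1 == "" then some rd.2 else none) = [p.2] := pv_hits_word p hp
        have hb : pvStepB (out, pvVOf n) c = (out ++ p.2, pvWordsB) := by
          simp only [pvStepB, hdig, Bool.false_eq_true, if_false, hv, hhits]
        rw [List.foldl_cons, List.foldl_cons, ha, hE1, hb]
        have hres := ih (out ++ p.2) [] (by decide)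
        rw [pv_vof_nil] at hres
        exact hres

-- ===== VERDICT (by name: the statement is the Claim_ definition above) =====
theorem solution_spec : Claim_equal_solution := by
  intro s _hd _hpre
  show solution s = solution_alt s
  simp only [solution, solution_alt]
  have h := pv_main s.toList "" [] (by decide)
  rw [pv_vof_nil] at h
  rw [h]
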